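-- pv_equiv track=rewrite | github.com/Morteza-Damghani-Nouri/Artificial_Intelligence_Project1 | main.py | array_copier
-- ===== SOURCE A (Python) =====
-- def array_copier(input_array, row, column):
--     copied_array = []
--     i = 0
--     while i < row:
--         temp = []
--         j = 0
--         while j < column:
--             temp.append(" ")
--             j += 1
--         copied_array.append(temp)
--         i += 1
--
--     i = 0
--     while i < row:
--         j = 0
--         while j < column:
--             copied_array[i][j] = input_array[i][j]
--             j += 1
--         i += 1
--     return copied_array
-- ===== SOURCE B (Python) =====
-- def array_copier(input_array, row, column):
--     return [[input_array[i][j] for j in range(column)] for i in range(row)]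
-- ===== Notes on version B (the rewrite author's own statement) =====
-- stated objective: simpler
-- what changed: B builds each row directly in a single comprehension pass instead of A's allocate-a-placeholder-grid-then-overwrite two-pass loop structure.
import Mathlib
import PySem

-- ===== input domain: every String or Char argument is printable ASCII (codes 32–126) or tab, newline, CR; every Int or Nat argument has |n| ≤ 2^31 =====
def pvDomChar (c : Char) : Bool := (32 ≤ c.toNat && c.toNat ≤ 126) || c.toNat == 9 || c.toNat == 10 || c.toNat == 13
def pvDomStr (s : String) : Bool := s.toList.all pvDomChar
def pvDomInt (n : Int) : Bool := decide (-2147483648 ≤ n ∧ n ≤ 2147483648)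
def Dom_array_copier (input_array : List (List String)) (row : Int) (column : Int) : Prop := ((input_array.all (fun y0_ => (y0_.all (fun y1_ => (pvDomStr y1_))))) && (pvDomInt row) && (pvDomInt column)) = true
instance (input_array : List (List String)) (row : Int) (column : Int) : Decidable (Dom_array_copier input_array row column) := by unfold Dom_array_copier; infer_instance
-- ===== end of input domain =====

-- B replaces A's allocate-placeholder-grid-then-overwrite two passes with one direct comprehension pass (simpler; same cost).

-- ===== PORT A =====
-- Literal port of A: first pass builds a row×column grid of " ", second pass overwrites each cell.
-- Indexing uses pyGetD/pySetD; Pre_ guarantees every index is in range, matching Python exactly there.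
def array_copier (input_array : List (List String)) (row : Int) (column : Int) : List (List String) :=
  let copied :=
    (PySem.List.pyRange 0 row 1).foldl
      (fun acc _ =>
        acc ++ [(PySem.List.pyRange 0 column 1).foldl (fun t _ => t ++ [" "]) []]) []
  (PySem.List.pyRange 0 row 1).foldl
    (fun ca i =>
      (PySem.List.pyRange 0 column 1).foldl
        (fun ca j =>
          PySem.List.pySetD ca i
            (PySem.List.pySetD (PySem.List.pyGetD ca i []) j
              (PySem.List.pyGetD (PySem.List.pyGetD input_array i []) j " "))) ca)
    copied

-- ===== PORT B =====
def array_copier_alt (input_array : List (List String)) (row : Int) (column : Int) : List (List String) :=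
  (PySem.List.pyRange 0 row 1).map (fun i =>
    (PySem.List.pyRange 0 column 1).map (fun j =>
      PySem.List.pyGetD (PySem.List.pyGetD input_array i []) j " "))

-- ===== PRECONDITION & SPEC =====
-- Pre_ excludes exactly the inputs where Python A raises IndexError (row>0 and column>0 but
-- input_array lacks `row` rows each of length ≥ `column`); B raises there too.
def Pre_array_copier (input_array : List (List String)) (row : Int) (column : Int) : Prop :=
  row ≤ 0 ∨ column ≤ 0 ∨
    (row ≤ (input_array.length : Int) ∧
      ∀ r ∈ input_array.take row.toNat, column ≤ (r.length : Int))
instance (input_array : List (List String)) (row : Int) (column : Int) : Decidable (Pre_array_copier input_array row column) := by unfold Pre_array_copier; infer_instance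
def pvWitness_array_copier : List (List String) × Int × Int := ([["a", "b"], ["c", "d"]], 2, 2)

def Spec_array_copier (input_array : List (List String)) (row : Int) (column : Int) (out : List (List String)) : Prop := out = array_copier_alt input_array row column
instance (input_array : List (List String)) (row : Int) (column : Int) (out : List (List String)) : Decidable (Spec_array_copier input_array row column out) := by unfold Spec_array_copier; infer_instance

-- ===== CLAIM (what is proved, stated in full; the proofs are below) =====
def Claim_equal_array_copier : Prop := ∀ (input_array : List (List String)) (row : Int) (column : Int), Dom_array_copier input_array row column → Pre_array_copier input_array row column → Spec_array_copier input_array row column (array_copier input_array row column)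

-- ===== LEMMAS AND PROOFS =====

theorem pv_set_append {α : Type} (l1 l2 : List α) (v : α) :
    (l1 ++ l2).set l1.length v = l1 ++ l2.set 0 v := by
  induction l1 with
  | nil => rfl
  | cons a t ih => simp [ih]

theorem pv_set_append' {α : Type} (l1 l2 : List α) (n : Nat) (h : l1.length = n) (v : α) :
    (l1 ++ l2).set n v = l1 ++ l2.set 0 v := by
  subst h; exact pv_set_append l1 l2 v

theorem pv_getD_append {α : Type} (l1 l2 : List α) (d : α) :
    (l1 ++ l2).getD l1.length d = l2.getD 0 d := by
  induction l1 with
  | nil => rfl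
  | cons a t ih => simpa using ih

theorem pv_getD_append' {α : Type} (l1 l2 : List α) (n : Nat) (h : l1.length = n) (d : α) :
    (l1 ++ l2).getD n d = l2.getD 0 d := by
  subst h; exact pv_getD_append l1 l2 d

-- Filling a row: setting indices 0..m-1 of r (length ≥ m) to t j
theorem pv_innerfill (t : Int → String) :
    ∀ (m : Nat) (r : List String), m ≤ r.length →
    (PySem.List.pyRange 0 (m : Int) 1).foldl
        (fun r j => PySem.List.pySetD r j (t j)) r
      = (List.range m).map (fun (j : Nat) => t (j : Int)) ++ r.drop m := by
  intro m
  induction m with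
  | zero => intro r _; simp [PySem.List.pyRange_one_eq_nil]
  | succ n ih =>
    intro r hr
    have h1 : PySem.List.pyRange 0 ((n + 1 : Nat) : Int) 1
        = PySem.List.pyRange 0 (n : Int) 1 ++ [(n : Int)] := by
      push_cast
      exact PySem.List.pyRange_one_succ_right (by positivity)
    rw [h1, List.foldl_append, ih r (by omega)]
    have hlenM : ((List.range n).map (fun (j : Nat) => t (j : Int))).length = n := by simp
    have hn : n < r.length := by omega
    simp only [List.foldl_cons, List.foldl_nil, PySem.List.pySetD_natCast]
    rw [pv_set_append' _ _ n hlenM, List.drop_eq_getElem_cons hn]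
    simp only [List.set_cons_zero, List.range_succ, List.map_append, List.map_cons,
      List.map_nil, List.append_assoc, List.cons_append, List.nil_append]

-- The whole-grid inner fold is a single row update (index k in range; u is the row step)
theorem pv_inner_comm (u : Int → List String → List String) (k : Nat) :
    ∀ (js : List Int) (ca : List (List String)), k < ca.length →
    js.foldl
        (fun ca j => PySem.List.pySetD ca (k : Int)
          (u j (PySem.List.pyGetD ca (k : Int) []))) ca
      = PySem.List.pySetD ca (k : Int)
          (js.foldl (fun r j => u j r) (PySem.List.pyGetD ca (k : Int) [])) := by
  intro js
  induction js with
  | nil =>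
    intro ca hk
    simp only [List.foldl_nil, PySem.List.pySetD_natCast, PySem.List.pyGetD_natCast]
    rw [List.getD_eq_getElem _ _ hk, List.set_getElem_self]
  | cons j js ih =>
    intro ca hk
    simp only [List.foldl_cons, PySem.List.pySetD_natCast, PySem.List.pyGetD_natCast] at *
    set v := u j (ca.getD k []) with hv
    have hk' : k < (ca.set k v).length := by simpa using hk
    rw [ih (ca.set k v) hk']
    have hget : (ca.set k v).getD k [] = v := by
      rw [List.getD_eq_getElem _ _ hk', List.getElem_set_self]
    rw [hget, List.set_set]

-- Second pass of A on a grid g: rows 0..n-1 are replaced by the filled rows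
theorem pv_outer (input_array : List (List String)) (column : Int) :
    ∀ (n : Nat) (g : List (List String)), n ≤ g.length →
    (PySem.List.pyRange 0 (n : Int) 1).foldl
        (fun ca i =>
          (PySem.List.pyRange 0 column 1).foldl
            (fun ca j =>
              PySem.List.pySetD ca i
                (PySem.List.pySetD (PySem.List.pyGetD ca i []) j
                  (PySem.List.pyGetD (PySem.List.pyGetD input_array i []) j " "))) ca) g
      = (List.range n).map (fun (k : Nat) =>
          (PySem.List.pyRange 0 column 1).foldl
            (fun r j => PySem.List.pySetD r j
              (PySem.List.pyGetD (PySem.List.pyGetD input_array (k : Int) []) j " "))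
            (g.getD k [])) ++ g.drop n := by
  intro n
  induction n with
  | zero => intro g _; simp [PySem.List.pyRange_one_eq_nil]
  | succ n ih =>
    intro g hg
    have h1 : PySem.List.pyRange 0 ((n + 1 : Nat) : Int) 1
        = PySem.List.pyRange 0 (n : Int) 1 ++ [(n : Int)] := by
      push_cast
      exact PySem.List.pyRange_one_succ_right (by positivity)
    rw [h1, List.foldl_append, ih g (by omega)]
    have hlenM : ((List.range n).map (fun (k : Nat) =>
        (PySem.List.pyRange 0 column 1).foldl
          (fun r j => PySem.List.pySetD r j
            (PySem.List.pyGetD (PySem.List.pyGetD input_array (k : Int) []) j " "))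
          (g.getD k []))).length = n := by simp
    have hn : n < g.length := by omega
    have hklt : n < (((List.range n).map (fun (k : Nat) =>
        (PySem.List.pyRange 0 column 1).foldl
          (fun r j => PySem.List.pySetD r j
            (PySem.List.pyGetD (PySem.List.pyGetD input_array (k : Int) []) j " "))
          (g.getD k []))) ++ g.drop n).length := by
      simp; omega
    simp only [List.foldl_cons, List.foldl_nil]
    rw [pv_inner_comm
      (fun j r => PySem.List.pySetD r j
        (PySem.List.pyGetD (PySem.List.pyGetD input_array (n : Int) []) j " "))
      n _ _ hklt]
    have hget : PySem.List.pyGetD (((List.range n).map (fun (k : Nat) =>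
        (PySem.List.pyRange 0 column 1).foldl
          (fun r j => PySem.List.pySetD r j
            (PySem.List.pyGetD (PySem.List.pyGetD input_array (k : Int) []) j " "))
          (g.getD k []))) ++ g.drop n) (n : Int) [] = g.getD n [] := by
      rw [PySem.List.pyGetD_natCast, pv_getD_append' _ _ n hlenM]
      rw [List.getD_eq_getElem _ _ (by simpa using hn), List.getD_eq_getElem _ _ hn]
      simp
    rw [hget, PySem.List.pySetD_natCast, pv_set_append' _ _ n hlenM,
      List.drop_eq_getElem_cons hn]
    simp only [List.set_cons_zero, List.range_succ, List.map_append, List.map_cons,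
      List.map_nil, List.append_assoc, List.cons_append, List.nil_append,
      List.getD_eq_getElem _ _ hn]

theorem array_copier_eq_alt (input_array : List (List String)) (row : Int) (column : Int) :
    array_copier input_array row column = array_copier_alt input_array row column := by
  unfold array_copier array_copier_alt
  have hP : (PySem.List.pyRange 0 column 1).foldl (fun t _ => t ++ [" "]) []
      = List.replicate column.toNat " " := by
    rw [PySem.List.foldl_append_singleton_eq_map]
    simp [List.map_const', PySem.List.length_pyRange_one]
  have hcopied : (PySem.List.pyRange 0 row 1).foldl
      (fun acc _ => acc ++ [(PySem.List.pyRange 0 column 1).foldl (fun t _ => t ++ [" "]) []]) []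
      = List.replicate row.toNat (List.replicate column.toNat " ") := by
    rw [PySem.List.foldl_append_singleton_eq_map]
    simp [hP, List.map_const', PySem.List.length_pyRange_one]
  simp only [hcopied]
  have hrange_row : PySem.List.pyRange 0 row 1 = PySem.List.pyRange 0 ((row.toNat : Nat) : Int) 1 := by
    by_cases h : row ≤ 0
    · rw [PySem.List.pyRange_one_eq_nil h,
        PySem.List.pyRange_one_eq_nil (by simp [Int.toNat_of_nonpos h])]
    · congr 1; omega
  rw [hrange_row, pv_outer input_array column row.toNat _ (by simp)]
  rw [PySem.List.pyRange_one 0 ((row.toNat : Nat) : Int)]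
  simp only [List.drop_replicate, Nat.sub_self, List.replicate_zero, List.append_nil,
    Int.sub_zero, Int.toNat_natCast, List.map_map]
  apply List.map_congr_left
  intro k hk
  have hk' : k < row.toNat := List.mem_range.mp hk
  have hgetrow : (List.replicate row.toNat (List.replicate column.toNat " ")).getD k []
      = List.replicate column.toNat " " := by
    rw [List.getD_eq_getElem _ _ (by simpa using hk')]
    simp
  simp only [Function.comp, hgetrow]
  have hrange_col : PySem.List.pyRange 0 column 1 = PySem.List.pyRange 0 ((column.toNat : Nat) : Int) 1 := by
    by_cases h : column ≤ 0
    · rw [PySem.List.pyRange_one_eq_nil h,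
        PySem.List.pyRange_one_eq_nil (by simp [Int.toNat_of_nonpos h])]
    · congr 1; omega
  rw [hrange_col, pv_innerfill _ column.toNat _ (by simp)]
  rw [PySem.List.pyRange_one 0 ((column.toNat : Nat) : Int)]
  have hmax : (max column 0).toNat = column.toNat := by omega
  simp [hmax, Function.comp]

-- ===== VERDICT (by name: the statement is the Claim_ definition above) =====
theorem array_copier_spec : Claim_equal_array_copier := by
  intro input_array row column _ _
  unfold Spec_array_copier
  exact array_copier_eq_alt input_array row column
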